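-- pv_equiv track=rewrite | github.com/PGrojpen/narrative-mining | scripts/download_gutenberg.py | looks_like_nonfiction
-- ===== SOURCE A (Python) =====
-- def normalize(value: str | None) -> str:
--     return (value or "").strip()
--
-- def joined_metadata_text(row: dict[str, str]) -> str:
--     return " | ".join([
--         normalize(row.get("Bookshelves")),
--         normalize(row.get("Subjects")),
--         normalize(row.get("Title")),
--     ]).lower()
--
-- def looks_like_nonfiction(row: dict[str, str]) -> bool:
--     text = joined_metadata_text(row)
--
--     blocked_terms = [
--         "philosophy",
--         "history",
--         "biography",
--         "autobiography",
--         "memoir",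
--         "essays",
--         "essay",
--         "letters",
--         "speeches",
--         "sermons",
--         "science",
--         "mathematics",
--         "politics",
--         "government",
--         "law",
--         "religion",
--         "theology",
--         "criticism",
--         "dictionary",
--         "encyclopedia",
--         "handbook",
--         "manual",
--         "guidebook",
--         "treatise",
--         "catalog",
--         "catalogue",
--         "index",
--         "bibliography",
--         "lectures",
--         "report",
--         "reports",
--         "proceedings",
--         "paper",
--         "papers",
--         "address",
--         "addresses",
--         "tract",
--         "tracts",
--         "reference",
--         "study",
--         "studies",
--     ]
--
--     return any(term in text for term in blocked_terms)
-- ===== SOURCE B (Python) =====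
-- _BLOCKED = (
--     "philosophy", "history", "biography", "autobiography", "memoir",
--     "essays", "essay", "letters", "speeches", "sermons", "science",
--     "mathematics", "politics", "government", "law", "religion",
--     "theology", "criticism", "dictionary", "encyclopedia", "handbook",
--     "manual", "guidebook", "treatise", "catalog", "catalogue", "index",
--     "bibliography", "lectures", "report", "reports", "proceedings",
--     "paper", "papers", "address", "addresses", "tract", "tracts",
--     "reference", "study", "studies",
-- )
--
--
-- def looks_like_nonfiction(row):
--     text = " | ".join(
--         (row.get(key) or "").strip()
--         for key in ("Bookshelves", "Subjects", "Title")
--     ).lower()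
--     # single left-to-right sweep: at each position, test each blocked
--     # term as a prefix there (position-major instead of term-major)
--     for i in range(len(text)):
--         for term in _BLOCKED:
--             if text.startswith(term, i):
--                 return True
--     return False
-- ===== Notes on version B (the rewrite author's own statement) =====
-- stated objective: alternative
-- what changed: Inverted the search: instead of running a full substring search over the text once per blocked term (term-major), B makes one left-to-right sweep over the joined metadata text and at each position tests each blocked term as a prefix there with str.startswith, short-circuiting on the first hit.
import Mathlib
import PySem

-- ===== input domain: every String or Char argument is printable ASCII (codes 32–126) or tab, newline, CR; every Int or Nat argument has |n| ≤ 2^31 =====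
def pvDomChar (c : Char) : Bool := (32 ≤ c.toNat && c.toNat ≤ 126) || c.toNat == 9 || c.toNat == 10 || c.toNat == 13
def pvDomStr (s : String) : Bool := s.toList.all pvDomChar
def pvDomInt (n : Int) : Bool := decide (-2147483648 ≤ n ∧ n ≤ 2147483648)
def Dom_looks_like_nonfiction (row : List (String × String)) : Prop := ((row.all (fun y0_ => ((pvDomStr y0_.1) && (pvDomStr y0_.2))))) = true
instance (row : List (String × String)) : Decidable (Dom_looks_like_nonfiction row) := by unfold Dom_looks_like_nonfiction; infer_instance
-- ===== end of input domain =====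

-- B makes one position-major sweep testing each blocked term as a prefix at each
-- position (startswith), instead of A's full substring search once per term (alternative).

-- ===== PORT A =====
-- def normalize(value): return (value or "").strip()   ('value or ""' = getD "", same for some "")
def pvNormalize (value : Option String) : String := PySem.Str.strip (value.getD "")

-- def joined_metadata_text(row): " | ".join([...]).lower()
def pvJoinedMetadataText (row : List (String × String)) : String :=
  PySem.Str.lower (PySem.Str.join " | "
    [ pvNormalize ((PySem.Dict.ofList row).get? "Bookshelves")
    , pvNormalize ((PySem.Dict.ofList row).get? "Subjects")
    , pvNormalize ((PySem.Dict.ofList row).get? "Title") ])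

def pvBlockedTerms : List String :=
  [ "philosophy", "history", "biography", "autobiography", "memoir", "essays",
    "essay", "letters", "speeches", "sermons", "science", "mathematics",
    "politics", "government", "law", "religion", "theology", "criticism",
    "dictionary", "encyclopedia", "handbook", "manual", "guidebook", "treatise",
    "catalog", "catalogue", "index", "bibliography", "lectures", "report",
    "reports", "proceedings", "paper", "papers", "address", "addresses",
    "tract", "tracts", "reference", "study", "studies" ]

def looks_like_nonfiction (row : List (String × String)) : Bool :=
  let text := pvJoinedMetadataText row
  pvBlockedTerms.any (fun term => PySem.Str.isIn term text)

-- ===== PORT B =====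
-- module-level _BLOCKED tuple of Source B
def pvBLOCKED : List String :=
  [ "philosophy", "history", "biography", "autobiography", "memoir", "essays",
    "essay", "letters", "speeches", "sermons", "science", "mathematics",
    "politics", "government", "law", "religion", "theology", "criticism",
    "dictionary", "encyclopedia", "handbook", "manual", "guidebook", "treatise",
    "catalog", "catalogue", "index", "bibliography", "lectures", "report",
    "reports", "proceedings", "paper", "papers", "address", "addresses",
    "tract", "tracts", "reference", "study", "studies" ]

-- for i in range(len(text)): for term in _BLOCKED: if text.startswith(term, i): return True
-- (text.startswith(term, i) with 0 ≤ i ≤ len(text) is 'term is a prefix of text[i:]')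
def looks_like_nonfiction_alt (row : List (String × String)) : Bool :=
  let text := (PySem.Str.lower (PySem.Str.join " | "
    (["Bookshelves", "Subjects", "Title"].map
      (fun key => PySem.Str.strip (((PySem.Dict.ofList row).get? key).getD ""))))).toList
  (List.range text.length).any (fun i =>
    pvBLOCKED.any (fun term => PySem.Chars.startswith (text.drop i) term.toList))

-- ===== PRECONDITION & SPEC =====
def Spec_looks_like_nonfiction (row : List (String × String)) (out : Bool) : Prop := out = looks_like_nonfiction_alt row
instance (row : List (String × String)) (out : Bool) : Decidable (Spec_looks_like_nonfiction row out) := by unfold Spec_looks_like_nonfiction; infer_instance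

-- ===== CLAIM (what is proved, stated in full; the proofs are below) =====
def Claim_equal_looks_like_nonfiction : Prop := ∀ (row : List (String × String)), Dom_looks_like_nonfiction row → Spec_looks_like_nonfiction row (looks_like_nonfiction row)

-- ===== LEMMAS AND PROOFS =====

-- a nonempty pattern occurs in cs iff it is a prefix of some suffix cs.drop i, i < cs.length
theorem pv_isIn_eq_any_range (t cs : List Char) (ht : t ≠ []) :
    PySem.Chars.isIn t cs =
      (List.range cs.length).any (fun i => PySem.Chars.startswith (cs.drop i) t) := by
  rw [Bool.eq_iff_iff]
  simp only [List.any_eq_true, List.mem_range, PySem.Chars.startswith_iff]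
  constructor
  · intro h
    obtain ⟨j, hj⟩ := (PySem.Chars.exists_prefix_drop_iff_isIn t cs).mpr h
    refine ⟨j, ?_, hj⟩
    rcases Nat.lt_or_ge j cs.length with h | h
    · exact h
    · exact absurd (List.prefix_nil.mp (by rwa [List.drop_eq_nil_of_le h] at hj)) ht
  · rintro ⟨i, _, hi⟩
    exact (PySem.Chars.exists_prefix_drop_iff_isIn t cs).mp ⟨i, hi⟩

theorem pvBlockedTerms_ne_nil : ∀ t ∈ pvBlockedTerms, t.toList ≠ [] := by decide

-- ===== VERDICT (by name: the statement is the Claim_ definition above) =====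
theorem looks_like_nonfiction_spec : Claim_equal_looks_like_nonfiction := by
  intro row _
  show looks_like_nonfiction row = looks_like_nonfiction_alt row
  unfold looks_like_nonfiction looks_like_nonfiction_alt pvJoinedMetadataText pvNormalize
  simp only [List.map]
  set cs := (PySem.Str.lower (PySem.Str.join " | "
    [ PySem.Str.strip (((PySem.Dict.ofList row).get? "Bookshelves").getD "")
    , PySem.Str.strip (((PySem.Dict.ofList row).get? "Subjects").getD "")
    , PySem.Str.strip (((PySem.Dict.ofList row).get? "Title").getD "") ])).toList with hcs
  rw [Bool.eq_iff_iff]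
  simp only [List.any_eq_true, List.mem_range, PySem.Str.isIn]
  constructor
  · rintro ⟨t, hmem, hin⟩
    rw [pv_isIn_eq_any_range _ _ (pvBlockedTerms_ne_nil t hmem)] at hin
    simp only [List.any_eq_true, List.mem_range] at hin
    obtain ⟨i, hlt, hsw⟩ := hin
    exact ⟨i, hlt, ⟨t, hmem, hsw⟩⟩
  · rintro ⟨i, hlt, t, hmem, hsw⟩
    refine ⟨t, hmem, ?_⟩
    rw [pv_isIn_eq_any_range _ _ (pvBlockedTerms_ne_nil t hmem)]
    simp only [List.any_eq_true, List.mem_range]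
    exact ⟨i, hlt, hsw⟩
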